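-- pv_equiv track=rewrite | github.com/SeverinoDaDalt/language_learning_assistant | utils.py | keyboard_adapter
-- ===== SOURCE A (Python) =====
-- from typing import Union, List
--
-- seveyin_settings = {
--     "a/-": "ā",
--     "e/-": "ē",
--     "i/-": "ī",
--     "o/-": "ō",
--     "u/-": "ū",
--     "a/v": "ǎ",
--     "e/v": "ě",
--     "i/v": "ǐ",
--     "o/v": "ǒ",
--     "u/v": "ǔ",
-- }
--
-- def keyboard_adapter(seveyin_word: Union[str, List[str]]):
--     as_list = type(seveyin_word) is list
--     seveyin_words = seveyin_word if as_list else [seveyin_word]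
--     pinyin_words = []
--     for seveyin_word in seveyin_words:
--         pinyin_word = seveyin_word
--         for seveyin_character, pinyin_character in seveyin_settings.items():
--             pinyin_word = pinyin_word.replace(seveyin_character, pinyin_character)
--         pinyin_words.append(pinyin_word)
--     return pinyin_words if as_list else pinyin_words[0]
-- ===== SOURCE B (Python) =====
-- from typing import Union, List
--
-- seveyin_settings = {
--     "a/-": "ā",
--     "e/-": "ē",
--     "i/-": "ī",
--     "o/-": "ō",
--     "u/-": "ū",
--     "a/v": "ǎ",
--     "e/v": "ě",
--     "i/v": "ǐ",
--     "o/v": "ǒ",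
--     "u/v": "ǔ",
-- }
--
-- def keyboard_adapter(seveyin_word: Union[str, List[str]]):
--     as_list = type(seveyin_word) is list
--     seveyin_words = seveyin_word if as_list else [seveyin_word]
--     pinyin_words = []
--     for word in seveyin_words:
--         buf = []
--         i = 0
--         n = len(word)
--         while i < n:
--             pinyin_character = seveyin_settings.get(word[i:i + 3])
--             if pinyin_character is not None:
--                 buf.append(pinyin_character)
--                 i += 3
--             else:
--                 buf.append(word[i])
--                 i += 1
--         pinyin_words.append("".join(buf))
--     return pinyin_words if as_list else pinyin_words[0]
-- ===== Notes on version B (the rewrite author's own statement) =====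
-- stated objective: simpler
-- what changed: A runs ten sequential whole-string str.replace passes (one per seveyin code); B makes a single left-to-right scan testing the 3-character window at each position against the code table, equivalent because the ten codes never overlap and their outputs never re-match.
import Mathlib
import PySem

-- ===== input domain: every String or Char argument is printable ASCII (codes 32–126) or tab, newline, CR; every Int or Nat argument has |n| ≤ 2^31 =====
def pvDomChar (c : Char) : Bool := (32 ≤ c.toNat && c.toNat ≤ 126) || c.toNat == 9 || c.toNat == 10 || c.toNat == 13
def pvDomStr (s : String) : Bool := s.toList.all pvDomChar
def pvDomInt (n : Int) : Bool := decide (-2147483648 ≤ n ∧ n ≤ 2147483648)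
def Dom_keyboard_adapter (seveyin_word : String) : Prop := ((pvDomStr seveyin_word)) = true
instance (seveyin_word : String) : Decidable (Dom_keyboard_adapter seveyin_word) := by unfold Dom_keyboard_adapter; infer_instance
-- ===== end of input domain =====

-- B replaces A's ten sequential str.replace passes with a single left-to-right scan that
-- tests the 3-character window at each position (objective: simpler one-pass algorithm).

-- ===== PORT A =====
def seveyinSettings : PySem.Dict String String := PySem.Dict.mk
  [("a/-", "ā"), ("e/-", "ē"), ("i/-", "ī"), ("o/-", "ō"), ("u/-", "ū"),
   ("a/v", "ǎ"), ("e/v", "ě"), ("i/v", "ǐ"), ("o/v", "ǒ"), ("u/v", "ǔ")]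

-- str branch of A (the Lean signature is String → String): wrap, one word, unwrap.
def keyboard_adapter (seveyin_word : String) : String :=
  seveyinSettings.items.foldl
    (fun pinyin_word kv => PySem.Str.replace pinyin_word kv.1 kv.2) seveyin_word

-- ===== PORT B =====
def kaTable : List (List Char × Char) :=
  [(['a','/','-'], 'ā'), (['e','/','-'], 'ē'), (['i','/','-'], 'ī'), (['o','/','-'], 'ō'), (['u','/','-'], 'ū'),
   (['a','/','v'], 'ǎ'), (['e','/','v'], 'ě'), (['i','/','v'], 'ǐ'), (['o','/','v'], 'ǒ'), (['u','/','v'], 'ǔ')]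

-- the while-loop of Source B: look the 3-char window up; on a hit emit the mapped char and
-- advance 3, otherwise emit the current char and advance 1
def kaScan (T : List (List Char × Char)) : List Char → List Char
  | [] => []
  | c :: t =>
    match T.lookup ((c :: t).take 3) with
    | some r => r :: kaScan T (t.drop 2)
    | none => c :: kaScan T t
termination_by l => l.length
decreasing_by
  · simp
  · simp

def keyboard_adapter_alt (seveyin_word : String) : String :=
  String.ofList (kaScan kaTable seveyin_word.toList)

-- ===== PRECONDITION & SPEC =====
def Spec_keyboard_adapter (seveyin_word : String) (out : String) : Prop := out = keyboard_adapter_alt seveyin_word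
instance (seveyin_word : String) (out : String) : Decidable (Spec_keyboard_adapter seveyin_word out) := by unfold Spec_keyboard_adapter; infer_instance

-- ===== CLAIM (what is proved, stated in full; the proofs are below) =====
def Claim_equal_keyboard_adapter : Prop := ∀ (seveyin_word : String), Dom_keyboard_adapter seveyin_word → Spec_keyboard_adapter seveyin_word (keyboard_adapter seveyin_word)

-- ===== LEMMAS AND PROOFS =====

-- single-pattern replace, for patterns of exactly three characters and a one-character
-- replacement (the shape of every entry of seveyin_settings)
def rep3 (p : Char × Char × Char) (r : Char) : List Char → List Char
  | a :: b :: c :: t =>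
    if a = p.1 ∧ b = p.2.1 ∧ c = p.2.2 then r :: rep3 p r t
    else a :: rep3 p r (b :: c :: t)
  | l => l
termination_by l => l.length

lemma ka_lookup_mem {T : List (List Char × Char)} {k : List Char} {v : Char}
    (h : T.lookup k = some v) : (k, v) ∈ T := by
  induction T with
  | nil => simp [List.lookup] at h
  | cons hd tl ih =>
    rw [List.lookup_cons] at h
    split at h
    · rename_i heq; simp at heq; cases h; subst heq; exact List.mem_cons_self
    · exact List.mem_cons_of_mem _ (ih h)

lemma ka_lookup_none_of_head {T : List (List Char × Char)} {d : Char} {w : List Char}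
    (h : ∀ kv ∈ T, kv.1.head? ≠ some d) : T.lookup (d :: w) = none := by
  cases hk : T.lookup (d :: w) with
  | none => rfl
  | some v => exact absurd rfl (h _ (ka_lookup_mem hk))

lemma rep3_cons_ne {p : Char × Char × Char} {r x : Char} (h : x ≠ p.1) (y : List Char) :
    rep3 p r (x :: y) = x :: rep3 p r y := by
  match y with
  | [] => simp [rep3]
  | [y1] => simp [rep3]
  | y1 :: y2 :: t => simp [rep3, h]

lemma kaScan_cons (S : List (List Char × Char)) (c : Char) (t : List Char) :
    kaScan S (c :: t) = match S.lookup ((c :: t).take 3) with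
      | some r => r :: kaScan S (t.drop 2)
      | none => c :: kaScan S t := by
  rw [kaScan]

lemma kaScan_cons_some {S : List (List Char × Char)} {c r' : Char} {t : List Char}
    (h : S.lookup ((c :: t).take 3) = some r') :
    kaScan S (c :: t) = r' :: kaScan S (t.drop 2) := by
  rw [kaScan_cons, h]

lemma kaScan_cons_none {S : List (List Char × Char)} {c : Char} {t : List Char}
    (h : S.lookup ((c :: t).take 3) = none) :
    kaScan S (c :: t) = c :: kaScan S t := by
  rw [kaScan_cons, h]

lemma ka_replace_go_eq (p : Char × Char × Char) (r : Char) :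
    ∀ (fuel : Nat) (l acc : List Char), l.length ≤ fuel →
      PySem.Chars.replace.go [p.1, p.2.1, p.2.2] [r] fuel l acc = acc.reverse ++ rep3 p r l := by
  intro fuel
  induction fuel with
  | zero =>
    intro l acc hl
    have : l = [] := List.length_eq_zero_iff.mp (Nat.le_zero.mp hl)
    subst this
    simp [PySem.Chars.replace.go, rep3]
  | succ n ih =>
    intro l acc hl
    match l with
    | [] => simp [PySem.Chars.replace.go, rep3]
    | c :: t =>
      rw [PySem.Chars.replace.go]
      by_cases hpre : List.isPrefixOf [p.1, p.2.1, p.2.2] (c :: t)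
      · simp only [hpre, if_true]
        match t, hpre with
        | t1 :: t2 :: rest, hpre =>
          simp only [List.isPrefixOf, Bool.and_eq_true, beq_iff_eq] at hpre
          obtain ⟨h1, h2, h3, -⟩ := hpre
          rw [show (List.drop [p.1, p.2.1, p.2.2].length (c :: t1 :: t2 :: rest)) = rest from rfl,
              ih rest ([r].reverse ++ acc) (by simp at hl ⊢; omega)]
          simp [rep3, h1.symm, h2.symm, h3.symm]
        | [], hpre => simp [List.isPrefixOf] at hpre
        | [t1], hpre => simp [List.isPrefixOf] at hpre
      · simp only [hpre, if_false]
        rw [ih t (c :: acc) (by simp at hl ⊢; omega)]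
        match t with
        | [] => simp [rep3]
        | [t1] => simp [rep3]
        | t1 :: t2 :: rest =>
          have hno : ¬ (c = p.1 ∧ t1 = p.2.1 ∧ t2 = p.2.2) := by
            intro ⟨e1, e2, e3⟩
            exact hpre (by simp [List.isPrefixOf, e1, e2, e3])
          simp [rep3, hno]

lemma ka_replace_eq_rep3 (p : Char × Char × Char) (r : Char) (l : List Char) :
    PySem.Chars.replace l [p.1, p.2.1, p.2.2] [r] = rep3 p r l := by
  rw [PySem.Chars.replace]
  simp only [List.isEmpty_cons, if_false, Bool.false_eq_true]
  simpa using ka_replace_go_eq p r l.length l [] (le_refl _)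

lemma kaScan_nil_table : ∀ l, kaScan [] l = l := by
  intro l
  induction l with
  | nil => rw [kaScan]
  | cons c t ih => rw [kaScan]; simp [List.lookup, ih]

lemma ka_scan_cons_inv {T : List (List Char × Char)} {d : Char}
    (hd : ∀ kv ∈ T, kv.2 ≠ d) {t y : List Char} (h : kaScan T t = d :: y) :
    ∃ t', t = d :: t' ∧ y = kaScan T t' := by
  match t with
  | [] => rw [kaScan] at h; exact absurd h (by simp)
  | c :: t' =>
    rw [kaScan] at h
    cases hk : T.lookup ((c :: t').take 3) with
    | some v =>
      rw [hk] at h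
      exact absurd (List.cons.injEq _ _ _ _ ▸ h).1 (hd _ (ka_lookup_mem hk))
    | none =>
      rw [hk] at h
      obtain ⟨h1, h2⟩ := (List.cons.injEq _ _ _ _ ▸ h)
      exact ⟨t', by rw [h1], h2.symm⟩

-- the workhorse: appending one (non-overlapping) pattern to the scan table is the same as
-- running one more sequential replace pass after the scan
lemma ka_step (T : List (List Char × Char)) (a b r : Char)
    (h3 : ∀ kv ∈ T, kv.1.length = 3)
    (hslash : ∀ kv ∈ T, kv.1.head? ≠ some '/')
    (hb : ∀ kv ∈ T, kv.1.head? ≠ some b)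
    (hra : ∀ kv ∈ T, kv.2 ≠ a)
    (hrs : ∀ kv ∈ T, kv.2 ≠ '/')
    (hrb : ∀ kv ∈ T, kv.2 ≠ b) :
    ∀ l, rep3 (a, '/', b) r (kaScan T l) = kaScan (T ++ [([a, '/', b], r)]) l := by
  suffices H : ∀ n l, l.length ≤ n →
      rep3 (a, '/', b) r (kaScan T l) = kaScan (T ++ [([a, '/', b], r)]) l by
    intro l; exact H l.length l (le_refl _)
  intro n
  induction n with
  | zero =>
    intro l hl
    have : l = [] := List.length_eq_zero_iff.mp (Nat.le_zero.mp hl)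
    subst this
    rw [kaScan, kaScan]; simp [rep3]
  | succ n ih =>
    intro l hl
    match l with
    | [] => rw [kaScan, kaScan]; simp [rep3]
    | c :: t =>
      cases hk : T.lookup ((c :: t).take 3) with
      | some rk =>
        have hmem := ka_lookup_mem hk
        have hlen := h3 _ hmem
        match t with
        | [] => simp at hlen
        | [t1] => simp at hlen
        | t1 :: t2 :: rest =>
          have hk' : (T ++ [([a, '/', b], r)]).lookup ((c :: t1 :: t2 :: rest).take 3) = some rk := by
            rw [List.lookup_append, hk, Option.some_or]
          rw [kaScan_cons_some hk, kaScan_cons_some hk']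
          rw [show ((t1 :: t2 :: rest).drop 2) = rest from rfl]
          rw [rep3_cons_ne (hra _ hmem)]
          rw [ih rest (by simp at hl; omega)]
      | none =>
        by_cases hw : (c :: t).take 3 = [a, '/', b]
        · match t, hw with
          | t1 :: t2 :: x, hw =>
            simp only [List.take, List.cons.injEq, and_true] at hw
            obtain ⟨hc, h1, h2⟩ := hw
            rw [hc, h1, h2] at hk hl ⊢
            have e1 : T.lookup ((('/' : Char) :: b :: x).take 3) = none := by
              rw [show ((('/' : Char) :: b :: x).take 3) = '/' :: ((b :: x).take 2) from rfl]
              exact ka_lookup_none_of_head hslash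
            have e2 : T.lookup ((b :: x).take 3) = none := by
              rw [show ((b :: x).take 3) = b :: (x.take 2) from rfl]
              exact ka_lookup_none_of_head hb
            have hk' : (T ++ [([a, '/', b], r)]).lookup ((a :: '/' :: b :: x).take 3) = some r := by
              rw [List.lookup_append, hk, Option.none_or]
              simp [List.lookup]
            rw [kaScan_cons_none hk, kaScan_cons_none e1, kaScan_cons_none e2]
            rw [show rep3 (a, '/', b) r (a :: '/' :: b :: kaScan T x)
                  = r :: rep3 (a, '/', b) r (kaScan T x) by simp [rep3]]
            rw [kaScan_cons_some hk']
            rw [show ((('/' : Char) :: b :: x).drop 2) = x from rfl]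
            rw [ih x (by simp at hl; omega)]
        · have hbeq : (((c :: t).take 3) == ([a, '/', b] : List Char)) = false := by
            simp only [beq_eq_false_iff_ne, ne_eq]; exact hw
          have hk' : (T ++ [([a, '/', b], r)]).lookup ((c :: t).take 3) = none := by
            rw [List.lookup_append, hk, Option.none_or]
            simp only [List.lookup]
            rw [hbeq]
          rw [kaScan_cons_none hk, kaScan_cons_none hk']
          by_cases hc : c = a
          · subst hc
            have hstep : rep3 (c, '/', b) r (c :: kaScan T t) = c :: rep3 (c, '/', b) r (kaScan T t) := by
              cases hw2 : kaScan T t with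
              | nil => simp [rep3]
              | cons w1 zw =>
                cases zw with
                | nil => simp [rep3]
                | cons w2 zw2 =>
                  by_cases h12 : w1 = '/' ∧ w2 = b
                  · obtain ⟨e1, e2⟩ := h12
                    rw [e1, e2] at hw2
                    obtain ⟨t1, ht, hy⟩ := ka_scan_cons_inv hrs hw2
                    obtain ⟨t2, ht1, -⟩ := ka_scan_cons_inv hrb hy.symm
                    rw [ht, ht1] at hw
                    exact absurd rfl hw
                  · have hno : ¬ (c = c ∧ w1 = '/' ∧ w2 = b) := fun ⟨_, e2, e3⟩ => h12 ⟨e2, e3⟩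
                    simp only [rep3]
                    rw [if_neg (fun h => h12 h.2)]
            rw [hstep, ih t (by simp at hl; omega)]
          · rw [rep3_cons_ne (by simpa using hc), ih t (by simp at hl; omega)]

-- chaining ka_step through the ten entries of the table
lemma ka_comp_eq_scan (l : List Char) :
    rep3 ('u','/','v') 'ǔ' (rep3 ('o','/','v') 'ǒ' (rep3 ('i','/','v') 'ǐ' (rep3 ('e','/','v') 'ě' (rep3 ('a','/','v') 'ǎ' (rep3 ('u','/','-') 'ū' (rep3 ('o','/','-') 'ō' (rep3 ('i','/','-') 'ī' (rep3 ('e','/','-') 'ē' (rep3 ('a','/','-') 'ā' (l)))))))))) = kaScan kaTable l := by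
  have s0 : ∀ l, rep3 ('a','/','-') 'ā' (kaScan [] l) = kaScan [(['a','/','-'], 'ā')] l := by
    intro l
    have h := ka_step [] 'a' '-' 'ā' (by decide) (by decide) (by decide) (by decide) (by decide) (by decide) l
    simpa using h
  have s1 : ∀ l, rep3 ('e','/','-') 'ē' (kaScan [(['a','/','-'], 'ā')] l) = kaScan [(['a','/','-'], 'ā'), (['e','/','-'], 'ē')] l := by
    intro l
    have h := ka_step [(['a','/','-'], 'ā')] 'e' '-' 'ē' (by decide) (by decide) (by decide) (by decide) (by decide) (by decide) l
    simpa using h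
  have s2 : ∀ l, rep3 ('i','/','-') 'ī' (kaScan [(['a','/','-'], 'ā'), (['e','/','-'], 'ē')] l) = kaScan [(['a','/','-'], 'ā'), (['e','/','-'], 'ē'), (['i','/','-'], 'ī')] l := by
    intro l
    have h := ka_step [(['a','/','-'], 'ā'), (['e','/','-'], 'ē')] 'i' '-' 'ī' (by decide) (by decide) (by decide) (by decide) (by decide) (by decide) l
    simpa using h
  have s3 : ∀ l, rep3 ('o','/','-') 'ō' (kaScan [(['a','/','-'], 'ā'), (['e','/','-'], 'ē'), (['i','/','-'], 'ī')] l) = kaScan [(['a','/','-'], 'ā'), (['e','/','-'], 'ē'), (['i','/','-'], 'ī'), (['o','/','-'], 'ō')] l := by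
    intro l
    have h := ka_step [(['a','/','-'], 'ā'), (['e','/','-'], 'ē'), (['i','/','-'], 'ī')] 'o' '-' 'ō' (by decide) (by decide) (by decide) (by decide) (by decide) (by decide) l
    simpa using h
  have s4 : ∀ l, rep3 ('u','/','-') 'ū' (kaScan [(['a','/','-'], 'ā'), (['e','/','-'], 'ē'), (['i','/','-'], 'ī'), (['o','/','-'], 'ō')] l) = kaScan [(['a','/','-'], 'ā'), (['e','/','-'], 'ē'), (['i','/','-'], 'ī'), (['o','/','-'], 'ō'), (['u','/','-'], 'ū')] l := by
    intro l
    have h := ka_step [(['a','/','-'], 'ā'), (['e','/','-'], 'ē'), (['i','/','-'], 'ī'), (['o','/','-'], 'ō')] 'u' '-' 'ū' (by decide) (by decide) (by decide) (by decide) (by decide) (by decide) l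
    simpa using h
  have s5 : ∀ l, rep3 ('a','/','v') 'ǎ' (kaScan [(['a','/','-'], 'ā'), (['e','/','-'], 'ē'), (['i','/','-'], 'ī'), (['o','/','-'], 'ō'), (['u','/','-'], 'ū')] l) = kaScan [(['a','/','-'], 'ā'), (['e','/','-'], 'ē'), (['i','/','-'], 'ī'), (['o','/','-'], 'ō'), (['u','/','-'], 'ū'), (['a','/','v'], 'ǎ')] l := by
    intro l
    have h := ka_step [(['a','/','-'], 'ā'), (['e','/','-'], 'ē'), (['i','/','-'], 'ī'), (['o','/','-'], 'ō'), (['u','/','-'], 'ū')] 'a' 'v' 'ǎ' (by decide) (by decide) (by decide) (by decide) (by decide) (by decide) l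
    simpa using h
  have s6 : ∀ l, rep3 ('e','/','v') 'ě' (kaScan [(['a','/','-'], 'ā'), (['e','/','-'], 'ē'), (['i','/','-'], 'ī'), (['o','/','-'], 'ō'), (['u','/','-'], 'ū'), (['a','/','v'], 'ǎ')] l) = kaScan [(['a','/','-'], 'ā'), (['e','/','-'], 'ē'), (['i','/','-'], 'ī'), (['o','/','-'], 'ō'), (['u','/','-'], 'ū'), (['a','/','v'], 'ǎ'), (['e','/','v'], 'ě')] l := by
    intro l
    have h := ka_step [(['a','/','-'], 'ā'), (['e','/','-'], 'ē'), (['i','/','-'], 'ī'), (['o','/','-'], 'ō'), (['u','/','-'], 'ū'), (['a','/','v'], 'ǎ')] 'e' 'v' 'ě' (by decide) (by decide) (by decide) (by decide) (by decide) (by decide) l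
    simpa using h
  have s7 : ∀ l, rep3 ('i','/','v') 'ǐ' (kaScan [(['a','/','-'], 'ā'), (['e','/','-'], 'ē'), (['i','/','-'], 'ī'), (['o','/','-'], 'ō'), (['u','/','-'], 'ū'), (['a','/','v'], 'ǎ'), (['e','/','v'], 'ě')] l) = kaScan [(['a','/','-'], 'ā'), (['e','/','-'], 'ē'), (['i','/','-'], 'ī'), (['o','/','-'], 'ō'), (['u','/','-'], 'ū'), (['a','/','v'], 'ǎ'), (['e','/','v'], 'ě'), (['i','/','v'], 'ǐ')] l := by
    intro l
    have h := ka_step [(['a','/','-'], 'ā'), (['e','/','-'], 'ē'), (['i','/','-'], 'ī'), (['o','/','-'], 'ō'), (['u','/','-'], 'ū'), (['a','/','v'], 'ǎ'), (['e','/','v'], 'ě')] 'i' 'v' 'ǐ' (by decide) (by decide) (by decide) (by decide) (by decide) (by decide) l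
    simpa using h
  have s8 : ∀ l, rep3 ('o','/','v') 'ǒ' (kaScan [(['a','/','-'], 'ā'), (['e','/','-'], 'ē'), (['i','/','-'], 'ī'), (['o','/','-'], 'ō'), (['u','/','-'], 'ū'), (['a','/','v'], 'ǎ'), (['e','/','v'], 'ě'), (['i','/','v'], 'ǐ')] l) = kaScan [(['a','/','-'], 'ā'), (['e','/','-'], 'ē'), (['i','/','-'], 'ī'), (['o','/','-'], 'ō'), (['u','/','-'], 'ū'), (['a','/','v'], 'ǎ'), (['e','/','v'], 'ě'), (['i','/','v'], 'ǐ'), (['o','/','v'], 'ǒ')] l := by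
    intro l
    have h := ka_step [(['a','/','-'], 'ā'), (['e','/','-'], 'ē'), (['i','/','-'], 'ī'), (['o','/','-'], 'ō'), (['u','/','-'], 'ū'), (['a','/','v'], 'ǎ'), (['e','/','v'], 'ě'), (['i','/','v'], 'ǐ')] 'o' 'v' 'ǒ' (by decide) (by decide) (by decide) (by decide) (by decide) (by decide) l
    simpa using h
  have s9 : ∀ l, rep3 ('u','/','v') 'ǔ' (kaScan [(['a','/','-'], 'ā'), (['e','/','-'], 'ē'), (['i','/','-'], 'ī'), (['o','/','-'], 'ō'), (['u','/','-'], 'ū'), (['a','/','v'], 'ǎ'), (['e','/','v'], 'ě'), (['i','/','v'], 'ǐ'), (['o','/','v'], 'ǒ')] l) = kaScan [(['a','/','-'], 'ā'), (['e','/','-'], 'ē'), (['i','/','-'], 'ī'), (['o','/','-'], 'ō'), (['u','/','-'], 'ū'), (['a','/','v'], 'ǎ'), (['e','/','v'], 'ě'), (['i','/','v'], 'ǐ'), (['o','/','v'], 'ǒ'), (['u','/','v'], 'ǔ')] l := by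
    intro l
    have h := ka_step [(['a','/','-'], 'ā'), (['e','/','-'], 'ē'), (['i','/','-'], 'ī'), (['o','/','-'], 'ō'), (['u','/','-'], 'ū'), (['a','/','v'], 'ǎ'), (['e','/','v'], 'ě'), (['i','/','v'], 'ǐ'), (['o','/','v'], 'ǒ')] 'u' 'v' 'ǔ' (by decide) (by decide) (by decide) (by decide) (by decide) (by decide) l
    simpa using h
  have e0 : ∀ l, rep3 ('a','/','-') 'ā' l = kaScan [(['a','/','-'], 'ā')] l := by
    intro l
    have h := s0 l
    rwa [kaScan_nil_table] at h
  rw [e0, s1, s2, s3, s4, s5, s6, s7, s8, s9]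
  rfl

-- ===== VERDICT (by name: the statement is the Claim_ definition above) =====
theorem keyboard_adapter_spec : Claim_equal_keyboard_adapter := by
  intro s _
  unfold Spec_keyboard_adapter keyboard_adapter keyboard_adapter_alt
  apply String.toList_inj.mp
  simp only [seveyinSettings, List.foldl_cons, List.foldl_nil,
    PySem.Str.toList_replace, String.toList_ofList]
  rw [show ("a/-" : String).toList = ['a','/','-'] from by decide,
      show ("ā" : String).toList = ['ā'] from by decide]
  rw [show ("e/-" : String).toList = ['e','/','-'] from by decide,
      show ("ē" : String).toList = ['ē'] from by decide]
  rw [show ("i/-" : String).toList = ['i','/','-'] from by decide,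
      show ("ī" : String).toList = ['ī'] from by decide]
  rw [show ("o/-" : String).toList = ['o','/','-'] from by decide,
      show ("ō" : String).toList = ['ō'] from by decide]
  rw [show ("u/-" : String).toList = ['u','/','-'] from by decide,
      show ("ū" : String).toList = ['ū'] from by decide]
  rw [show ("a/v" : String).toList = ['a','/','v'] from by decide,
      show ("ǎ" : String).toList = ['ǎ'] from by decide]
  rw [show ("e/v" : String).toList = ['e','/','v'] from by decide,
      show ("ě" : String).toList = ['ě'] from by decide]
  rw [show ("i/v" : String).toList = ['i','/','v'] from by decide,
      show ("ǐ" : String).toList = ['ǐ'] from by decide]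
  rw [show ("o/v" : String).toList = ['o','/','v'] from by decide,
      show ("ǒ" : String).toList = ['ǒ'] from by decide]
  rw [show ("u/v" : String).toList = ['u','/','v'] from by decide,
      show ("ǔ" : String).toList = ['ǔ'] from by decide]
  rw [ka_replace_eq_rep3 ('a','/','-') 'ā']
  rw [ka_replace_eq_rep3 ('e','/','-') 'ē']
  rw [ka_replace_eq_rep3 ('i','/','-') 'ī']
  rw [ka_replace_eq_rep3 ('o','/','-') 'ō']
  rw [ka_replace_eq_rep3 ('u','/','-') 'ū']
  rw [ka_replace_eq_rep3 ('a','/','v') 'ǎ']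
  rw [ka_replace_eq_rep3 ('e','/','v') 'ě']
  rw [ka_replace_eq_rep3 ('i','/','v') 'ǐ']
  rw [ka_replace_eq_rep3 ('o','/','v') 'ǒ']
  rw [ka_replace_eq_rep3 ('u','/','v') 'ǔ']
  exact ka_comp_eq_scan s.toList
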